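-- pv_equiv track=rewrite | github.com/sfmalloy/everybody-codes | events/2024/quest01/p1.py | solve
-- ===== SOURCE A (Python) =====
-- def solve(ipt: str):
--     vals = {
--         'A': 0,
--         'B': 1,
--         'C': 3
--     }
--     total = 0
--     for bug in ipt:
--         total += vals[bug]
--     return total
-- ===== SOURCE B (Python) =====
-- def solve(ipt: str):
--     vals = {
--         'A': 0,
--         'B': 1,
--         'C': 3
--     }
--     return sum(vals[ch] * ipt.count(ch) for ch in set(ipt))
-- ===== Notes on version B (the rewrite author's own statement) =====
-- stated objective: idiomatic
-- what changed: B iterates over the distinct characters of the input (set(ipt)) and sums cost times multiplicity, instead of A's per-character loop that performs a dict lookup for every position.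
import Mathlib
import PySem

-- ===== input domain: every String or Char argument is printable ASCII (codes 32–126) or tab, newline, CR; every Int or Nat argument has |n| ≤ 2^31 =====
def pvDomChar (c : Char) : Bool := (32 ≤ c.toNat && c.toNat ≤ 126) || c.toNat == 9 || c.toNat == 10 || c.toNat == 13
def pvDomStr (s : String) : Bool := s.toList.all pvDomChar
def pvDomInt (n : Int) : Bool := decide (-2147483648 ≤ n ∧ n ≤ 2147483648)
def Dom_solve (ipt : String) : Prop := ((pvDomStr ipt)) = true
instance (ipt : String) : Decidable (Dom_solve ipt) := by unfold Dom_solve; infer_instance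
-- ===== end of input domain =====

-- B sums cost × multiplicity over the DISTINCT characters of the input instead of A's per-character loop (objective: idiomatic).

-- ===== PORT A =====
-- vals as an association dict keyed by Char (Python's 1-char string keys)
def solveVals : PySem.Dict Char Int :=
  (((PySem.Dict.empty).insert 'A' 0).insert 'B' 1).insert 'C' 3

-- vals[bug] raises KeyError for a missing key; Pre_solve excludes such inputs, so getD 0 is never the default there
def solve (ipt : String) : Int :=
  ipt.toList.foldl (fun total bug => total + (solveVals.get? bug).getD 0) 0

-- ===== PORT B =====
-- set(ipt) = PySem.Set.ofList; the generator is consumed by sum, which is order-independent, ported as map + sum.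
-- ipt.count(ch) with a 1-character ch counts occurrences of that character: exact as List.count on toList.
-- vals[ch] raises KeyError for a missing key; Pre_solve excludes such inputs, so getD 0 is never the default there.
def solve_alt (ipt : String) : Int :=
  ((PySem.Set.ofList ipt.toList).map
    (fun ch => (solveVals.get? ch).getD 0 * (ipt.toList.count ch : Int))).sum

-- ===== PRECONDITION & SPEC =====
-- Pre_ excludes exactly the strings containing a character outside vals, on which both A and B raise KeyError
def Pre_solve (ipt : String) : Prop :=
  ipt.toList.all (fun c => "ABC".toList.contains c) = true
instance (ipt : String) : Decidable (Pre_solve ipt) := by unfold Pre_solve; infer_instance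
def pvWitness_solve : String := "ABCBA"

def Spec_solve (ipt : String) (out : Int) : Prop := out = solve_alt ipt
instance (ipt : String) (out : Int) : Decidable (Spec_solve ipt out) := by unfold Spec_solve; infer_instance

-- ===== CLAIM (what is proved, stated in full; the proofs are below) =====
def Claim_equal_solve : Prop := ∀ (ipt : String), Dom_solve ipt → Pre_solve ipt → Spec_solve ipt (solve ipt)

-- ===== LEMMAS AND PROOFS =====

-- A's loop on a list of A/B/C characters computes 0·#A + 1·#B + 3·#C (plus the accumulator)
theorem solveA_foldl (l : List Char) (t : Int)
    (h : ∀ c ∈ l, c = 'A' ∨ c = 'B' ∨ c = 'C') :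
    l.foldl (fun total bug => total + (solveVals.get? bug).getD 0) t
      = t + (l.count 'B' : Int) + 3 * (l.count 'C' : Int) := by
  induction l generalizing t with
  | nil => simp
  | cons c cs ih =>
    have hc := h c (List.mem_cons_self)
    have hcs : ∀ x ∈ cs, x = 'A' ∨ x = 'B' ∨ x = 'C' :=
      fun x hx => h x (List.mem_cons_of_mem _ hx)
    simp only [List.foldl_cons, ih _ hcs, List.count_cons]
    rcases hc with rfl | rfl | rfl <;>
      simp [solveVals, PySem.Dict.get?, PySem.Dict.insert, PySem.Dict.empty] <;> ring

-- B's sum over the distinct characters of an A/B/C list is 1·#B + 3·#C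
theorem solveB_sum (l : List Char)
    (h : ∀ c ∈ l, c = 'A' ∨ c = 'B' ∨ c = 'C') :
    ((PySem.Set.ofList l).map
      (fun ch => (solveVals.get? ch).getD 0 * (l.count ch : Int))).sum
      = (l.count 'B' : Int) + 3 * (l.count 'C' : Int) := by
  set g : Char → Int := fun ch => (solveVals.get? ch).getD 0 * (l.count ch : Int) with hg
  have hnd : (PySem.Set.ofList l).Nodup := PySem.Set.nodup_ofList l
  have hfin : ((PySem.Set.ofList l).map g).sum
      = ∑ c ∈ (PySem.Set.ofList l).toFinset, g c :=
    (List.sum_toFinset g hnd).symm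
  have hsub : (PySem.Set.ofList l).toFinset ⊆ ({'A', 'B', 'C'} : Finset Char) := by
    intro c hc
    have hcl : c ∈ l := (PySem.Set.mem_ofList _ _).mp (List.mem_toFinset.mp hc)
    rcases h c hcl with rfl | rfl | rfl <;> simp
  have hzero : ∀ c ∈ ({'A', 'B', 'C'} : Finset Char),
      c ∉ (PySem.Set.ofList l).toFinset → g c = 0 := by
    intro c _ hc
    have hcl : c ∉ l := fun hm =>
      hc (List.mem_toFinset.mpr ((PySem.Set.mem_ofList _ _).mpr hm))
    have : l.count c = 0 := List.count_eq_zero.mpr hcl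
    simp [hg, this]
  have habc : ∑ c ∈ ({'A', 'B', 'C'} : Finset Char), g c = g 'A' + g 'B' + g 'C' := by
    rw [show ({'A', 'B', 'C'} : Finset Char) = insert 'A' (insert 'B' {'C'}) from rfl]
    rw [Finset.sum_insert (by decide), Finset.sum_insert (by decide), Finset.sum_singleton]
    ring
  rw [hfin, Finset.sum_subset hsub hzero, habc]
  simp [hg, solveVals, PySem.Dict.get?, PySem.Dict.insert, PySem.Dict.empty]

-- ===== VERDICT (by name: the statement is the Claim_ definition above) =====
theorem solve_spec : Claim_equal_solve := by
  intro ipt _ hpre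
  unfold Spec_solve solve solve_alt
  have h : ∀ c ∈ ipt.toList, c = 'A' ∨ c = 'B' ∨ c = 'C' := by
    intro c hc
    have hm := (List.all_eq_true.mp hpre) c hc
    have he : ("ABC".toList) = ['A', 'B', 'C'] := by decide
    rw [he] at hm
    simpa using hm
  rw [solveA_foldl _ _ h, solveB_sum _ h]
  ring
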